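-- pv_equiv track=rewrite | github.com/mvmaasakkers/AdventOfCode2019 | 2024/day07/day07.py | eval_right_to_left
-- ===== SOURCE A (Python) =====
-- def eval_right_to_left(l: list[int], target: int) -> bool:
--     if len(l) == 1:
--         return l[0] == target
--
--     n = l.pop(0)
--
--     l1 = l.copy()
--
--     l[0] += n
--     l1[0] *= n
--
--     return eval_right_to_left(l, target) or eval_right_to_left(l1, target)
-- ===== SOURCE B (Python) =====
-- def eval_right_to_left(l: list[int], target: int) -> bool:
--     # Backward search from the target over the reversed list:
--     # undo the last operator by subtracting, or by dividing when exact.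
--     def back(r, t):
--         x = r[0]
--         rest = r[1:]
--         if not rest:
--             return x == t
--         if back(rest, t - x):
--             return True
--         if x == 0:
--             return t == 0
--         return t % x == 0 and back(rest, t // x)
--     return back(l[::-1], target)
-- ===== Notes on version B (the rewrite author's own statement) =====
-- stated objective: faster
-- what changed: A forward-enumerates all 2^(n-1) operator choices by rewriting the front of the list; B searches backward from the target over the reversed list, undoing the last operator by subtraction or by exact division (pruning the multiply branch whenever the target is not divisible by the last element).
import Mathlib
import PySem

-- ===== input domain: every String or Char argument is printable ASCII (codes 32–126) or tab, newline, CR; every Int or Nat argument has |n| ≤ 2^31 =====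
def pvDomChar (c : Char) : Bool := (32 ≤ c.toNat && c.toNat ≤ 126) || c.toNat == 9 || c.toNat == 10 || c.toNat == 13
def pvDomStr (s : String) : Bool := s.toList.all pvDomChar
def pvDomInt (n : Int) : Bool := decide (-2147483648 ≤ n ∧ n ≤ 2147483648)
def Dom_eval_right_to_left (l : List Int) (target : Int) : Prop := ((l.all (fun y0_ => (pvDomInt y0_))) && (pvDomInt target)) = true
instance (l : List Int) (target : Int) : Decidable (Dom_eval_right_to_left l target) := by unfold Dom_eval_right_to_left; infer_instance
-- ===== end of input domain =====

-- B replaces A's forward enumeration of all operator choices by a backward search from the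
-- target over the reversed list (undo the last op by subtraction, or by exact division),
-- pruning multiply branches when the target is not divisible. Python A mutates its list
-- argument (pop/in-place update); the equivalence proved here is about the return value only.

-- ===== PORT A =====
-- A pops the first element, adds resp. multiplies it into the new front, and recurses on both.
def eval_right_to_left (l : List Int) (target : Int) : Bool :=
  match l with
  | [] => false            -- A raises IndexError here (pop from empty); excluded by Pre_
  | [a] => a == target
  | a :: b :: rest =>
      eval_right_to_left ((a + b) :: rest) target || eval_right_to_left ((a * b) :: rest) target
termination_by l.length

-- ===== PORT B =====
-- back r t: can the prefix of l whose reversal is r reach t?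
def pvBack (r : List Int) (t : Int) : Bool :=
  match r with
  | [] => false            -- unreachable: B indexes r[0] only on nonempty r
  | [x] => x == t
  | x :: y :: rest =>
      if pvBack (y :: rest) (t - x) then true
      else if x == 0 then t == 0
      else PySem.Int.mod t x == 0 && pvBack (y :: rest) (PySem.Int.floordiv t x)

def eval_right_to_left_alt (l : List Int) (target : Int) : Bool :=
  pvBack ((PySem.List.slice? l none none (-1)).getD []) target

-- ===== PRECONDITION & SPEC =====
-- A raises IndexError on the empty list (pop from empty); B raises there too (r[0]).
def Pre_eval_right_to_left (l : List Int) (target : Int) : Prop := l ≠ []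
instance (l : List Int) (target : Int) : Decidable (Pre_eval_right_to_left l target) := by
  unfold Pre_eval_right_to_left; infer_instance

def pvWitness_eval_right_to_left : List Int × Int := ([2, 3, 4], 20)

def Spec_eval_right_to_left (l : List Int) (target : Int) (out : Bool) : Prop := out = eval_right_to_left_alt l target
instance (l : List Int) (target : Int) (out : Bool) : Decidable (Spec_eval_right_to_left l target out) := by unfold Spec_eval_right_to_left; infer_instance

-- ===== CLAIM (what is proved, stated in full; the proofs are below) =====
def Claim_equal_eval_right_to_left : Prop := ∀ (l : List Int) (target : Int), Dom_eval_right_to_left l target → Pre_eval_right_to_left l target → Spec_eval_right_to_left l target (eval_right_to_left l target)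

-- ===== LEMMAS AND PROOFS =====

-- Appending a last element: the reachable targets are v + x or v * x for reachable v.
theorem evalA_append_last : ∀ (n : Nat) (l : List Int), l.length = n → l ≠ [] → ∀ (x t : Int),
    (eval_right_to_left (l ++ [x]) t = true ↔
      ∃ v, eval_right_to_left l v = true ∧ (v + x = t ∨ v * x = t)) := by
  intro n
  induction n with
  | zero => intro l hlen hne; cases l <;> simp_all
  | succ n ih =>
    intro l hlen hne x t
    match l with
    | [a] =>
        simp only [List.cons_append, List.nil_append, eval_right_to_left, beq_iff_eq,
          Bool.or_eq_true]
        constructor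
        · rintro (h | h)
          · exact ⟨a, rfl, Or.inl h⟩
          · exact ⟨a, rfl, Or.inr h⟩
        · rintro ⟨v, hv, h | h⟩ <;> subst hv
          · exact Or.inl h
          · exact Or.inr h
    | a :: b :: rest =>
        have h1 := ih ((a + b) :: rest) (by simp_all) (by simp) x t
        have h2 := ih ((a * b) :: rest) (by simp_all) (by simp) x t
        simp only [List.cons_append] at h1 h2 ⊢
        rw [show eval_right_to_left (a :: b :: (rest ++ [x])) t =
              (eval_right_to_left ((a + b) :: (rest ++ [x])) t ||
               eval_right_to_left ((a * b) :: (rest ++ [x])) t) from by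
            conv_lhs => rw [eval_right_to_left]]
        simp only [Bool.or_eq_true, h1, h2]
        constructor
        · rintro (⟨v, hv, h⟩ | ⟨v, hv, h⟩)
          · exact ⟨v, by simp [eval_right_to_left, hv], h⟩
          · exact ⟨v, by simp [eval_right_to_left, hv], h⟩
        · rintro ⟨v, hv, h⟩
          rw [show eval_right_to_left (a :: b :: rest) v =
                (eval_right_to_left ((a + b) :: rest) v ||
                 eval_right_to_left ((a * b) :: rest) v) from by
              conv_lhs => rw [eval_right_to_left]] at hv
          rcases Bool.or_eq_true_iff.mp hv with hv | hv
          · exact Or.inl ⟨v, hv, h⟩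
          · exact Or.inr ⟨v, hv, h⟩

-- Every nonempty list reaches some value.
theorem evalA_nonempty : ∀ (n : Nat) (l : List Int), l.length = n → l ≠ [] →
    ∃ v, eval_right_to_left l v = true := by
  intro n
  induction n with
  | zero => intro l hlen hne; cases l <;> simp_all
  | succ n ih =>
    intro l hlen hne
    match l with
    | [a] => exact ⟨a, by simp [eval_right_to_left]⟩
    | a :: b :: rest =>
        obtain ⟨v, hv⟩ := ih ((a + b) :: rest) (by simp_all) (by simp)
        exact ⟨v, by simp [eval_right_to_left, hv]⟩

-- The backward search over r decides forward reachability of the reversal of r.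
theorem back_eq : ∀ (r : List Int), r ≠ [] → ∀ (t : Int),
    pvBack r t = eval_right_to_left r.reverse t := by
  intro r
  induction r with
  | nil => intro h; exact absurd rfl h
  | cons x rs ih =>
    intro _ t
    match rs with
    | [] => simp [pvBack, eval_right_to_left]
    | y :: rest =>
        have key : ∀ s, pvBack (y :: rest) s = eval_right_to_left (y :: rest).reverse s :=
          ih (by simp)
        have hrev : (x :: y :: rest).reverse = (y :: rest).reverse ++ [x] := by simp
        have hA := evalA_append_last (y :: rest).reverse.length (y :: rest).reverse rfl
          (by simp) x t
        have hne : ∃ v, eval_right_to_left (y :: rest).reverse v = true :=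
          evalA_nonempty (y :: rest).reverse.length (y :: rest).reverse rfl (by simp)
        rw [hrev, Bool.eq_iff_iff, hA]
        simp only [pvBack, key]
        constructor
        · intro h
          split_ifs at h with hsub hx0
          · exact ⟨t - x, hsub, Or.inl (by ring)⟩
          · -- x = 0, t = 0: any reachable v has v * 0 = 0 = t
            obtain ⟨v, hv⟩ := hne
            refine ⟨v, hv, Or.inr ?_⟩
            have hx : x = 0 := by simpa using hx0
            have ht : t = 0 := by simpa using h
            simp [hx, ht]
          · -- divisibility branch
            rcases Bool.and_eq_true_iff.mp h with ⟨hmod, hrec⟩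
            have hx : x ≠ 0 := by simpa using hx0
            have hmod' : PySem.Int.mod t x = 0 := by simpa using hmod
            refine ⟨PySem.Int.floordiv t x, hrec, Or.inr ?_⟩
            have := PySem.Int.floordiv_mul_add_mod t x
            omega
        · rintro ⟨v, hv, hcase⟩
          split_ifs with hsub hx0
          · rfl
          · -- x = 0: then v * x = t forces t = 0
            have hx : x = 0 := by simpa using hx0
            have hvmul : v * x = t := by
              rcases hcase with h | h
              · exact absurd (by rw [show t - x = v by omega]; exact hv) hsub
              · exact h
            have ht : t = 0 := by rw [hx] at hvmul; simpa using hvmul.symm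
            simp [ht]
          · have hx : x ≠ 0 := by simpa using hx0
            have hvmul : v * x = t := by
              rcases hcase with h | h
              · exact absurd (by rw [show t - x = v by omega]; exact hv) hsub
              · exact h
            have hdvd : x ∣ t := ⟨v, by rw [← hvmul]; ring⟩
            have hmod : PySem.Int.mod t x = 0 := (PySem.Int.mod_eq_zero_iff_dvd t x).mpr hdvd
            have hfd : PySem.Int.floordiv t x = v := by
              have h1 := PySem.Int.floordiv_mul_add_mod t x
              rw [hmod] at h1
              have h2 : PySem.Int.floordiv t x * x = v * x := by omega
              exact mul_right_cancel₀ hx h2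
            refine Bool.and_eq_true_iff.mpr ⟨by rw [hmod]; rfl, ?_⟩
            rw [hfd]; exact hv

-- ===== VERDICT (by name: the statement is the Claim_ definition above) =====
theorem eval_right_to_left_spec : Claim_equal_eval_right_to_left := by
  intro l target _ hpre
  unfold Spec_eval_right_to_left eval_right_to_left_alt
  rw [PySem.List.slice?_none_none_neg_one, Option.getD_some,
    back_eq l.reverse (by simpa using hpre), List.reverse_reverse]
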